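-- pv_equiv track=rewrite | github.com/AungThuMyint/ProxmoxReportGenerator | ProxmoxReportGenerator.py | summarize_vms
-- ===== SOURCE A (Python) =====
-- from typing import Any, Dict, List, Optional, Tuple
--
-- def summarize_vms(resources: List[Dict[str, Any]]) -> Dict[str, Dict[str, int]]:
--     by_node: Dict[str, Dict[str, int]] = {}
--     for r in resources:
--         node = r.get("node")
--         if not node:
--             continue
--         by_node.setdefault(node, {"qemu": 0, "lxc": 0, "running": 0})
--         if r.get("type") == "qemu":
--             by_node[node]["qemu"] += 1
--         elif r.get("type") == "lxc":
--             by_node[node]["lxc"] += 1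
--         if r.get("status") == "running":
--             by_node[node]["running"] += 1
--     return by_node
-- ===== SOURCE B (Python) =====
-- def summarize_vms(resources):
--     groups = {}
--     for r in resources:
--         node = r.get("node")
--         if not node:
--             continue
--         groups.setdefault(node, []).append(r)
--     return {
--         node: {
--             "qemu": sum(1 for r in rs if r.get("type") == "qemu"),
--             "lxc": sum(1 for r in rs if r.get("type") == "lxc"),
--             "running": sum(1 for r in rs if r.get("status") == "running"),
--         }
--         for node, rs in groups.items()
--     }
-- ===== Notes on version B (the rewrite author's own statement) =====
-- stated objective: alternative
-- what changed: Replaces A's single interleaved counting pass (setdefault + three in-place counter increments per record) with a two-phase partition-then-aggregate: first group records by node, then build the result with one dict comprehension computing each of the three counts as a separate sum over that node's group.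
import Mathlib
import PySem

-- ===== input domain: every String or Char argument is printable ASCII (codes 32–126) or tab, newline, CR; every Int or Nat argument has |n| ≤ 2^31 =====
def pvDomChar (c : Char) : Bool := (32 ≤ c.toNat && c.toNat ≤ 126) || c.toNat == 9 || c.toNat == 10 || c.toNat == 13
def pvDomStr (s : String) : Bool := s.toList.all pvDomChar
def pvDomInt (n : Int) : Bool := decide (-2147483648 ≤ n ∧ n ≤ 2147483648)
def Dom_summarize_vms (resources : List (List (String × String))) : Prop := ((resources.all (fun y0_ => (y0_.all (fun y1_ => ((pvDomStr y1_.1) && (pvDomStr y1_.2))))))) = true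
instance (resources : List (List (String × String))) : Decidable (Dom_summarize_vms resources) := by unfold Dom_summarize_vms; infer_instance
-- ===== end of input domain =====

-- B replaces A's single interleaved counting pass with a partition-by-node phase
-- followed by three separate count-sums per group (alternative decomposition, same cost).

-- ===== PORT A =====
-- r.get(key) on the record dict (assoc list, first match)
def pvGetR (r : List (String × String)) (k : String) : Option String :=
  PySem.Dict.get? (PySem.Dict.mk r) k

-- the fresh zero dict {"qemu": 0, "lxc": 0, "running": 0}
def pvZero : PySem.Dict String Int :=
  PySem.Dict.mk [("qemu", 0), ("lxc", 0), ("running", 0)]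

-- one iteration of A's loop body
def pvStepA (byNode : PySem.Dict String (PySem.Dict String Int)) (r : List (String × String)) :
    PySem.Dict String (PySem.Dict String Int) :=
  match pvGetR r "node" with
  | none => byNode
  | some node =>
    if node = "" then byNode
    else
      let d0 := byNode.setdefault node pvZero
      let d1 :=
        if pvGetR r "type" = some "qemu" then
          d0.modify node pvZero (fun inn => inn.modify "qemu" 0 (· + 1))
        else if pvGetR r "type" = some "lxc" then
          d0.modify node pvZero (fun inn => inn.modify "lxc" 0 (· + 1))
        else d0
      if pvGetR r "status" = some "running" then
        d1.modify node pvZero (fun inn => inn.modify "running" 0 (· + 1))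
      else d1

def summarize_vms (resources : List (List (String × String))) : List (String × List (String × Int)) :=
  ((resources.foldl pvStepA PySem.Dict.empty).items).map (fun p => (p.1, p.2.items))

-- ===== PORT B =====
-- grouping step: groups.setdefault(node, []).append(r)
def pvStepB (g : PySem.Dict String (List (List (String × String)))) (r : List (String × String)) :
    PySem.Dict String (List (List (String × String))) :=
  match pvGetR r "node" with
  | none => g
  | some node =>
    if node = "" then g
    else g.modify node [] (· ++ [r])

-- the three per-group sums (sum(1 for r in rs if …) is List.countP)
def pvCounts (rs : List (List (String × String))) : List (String × Int) :=
  [("qemu",    ((rs.countP (fun r => pvGetR r "type" == some "qemu")   : Nat) : Int)),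
   ("lxc",     ((rs.countP (fun r => pvGetR r "type" == some "lxc")    : Nat) : Int)),
   ("running", ((rs.countP (fun r => pvGetR r "status" == some "running") : Nat) : Int))]

def summarize_vms_alt (resources : List (List (String × String))) : List (String × List (String × Int)) :=
  let groups := resources.foldl pvStepB PySem.Dict.empty
  groups.items.map (fun p => (p.1, pvCounts p.2))

-- ===== PRECONDITION & SPEC =====
def Spec_summarize_vms (resources : List (List (String × String))) (out : List (String × List (String × Int))) : Prop := out = summarize_vms_alt resources
instance (resources : List (List (String × String))) (out : List (String × List (String × Int))) : Decidable (Spec_summarize_vms resources out) := by unfold Spec_summarize_vms; infer_instance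

-- ===== CLAIM (what is proved, stated in full; the proofs are below) =====
def Claim_equal_summarize_vms : Prop := ∀ (resources : List (List (String × String))), Dom_summarize_vms resources → Spec_summarize_vms resources (summarize_vms resources)

-- ===== LEMMAS AND PROOFS =====

-- the inner-dict update A performs for one record r, as a function of the counter dict
def pvInnerInc (r : List (String × String)) (c : PySem.Dict String Int) : PySem.Dict String Int :=
  let c1 :=
    if pvGetR r "type" = some "qemu" then c.modify "qemu" 0 (· + 1)
    else if pvGetR r "type" = some "lxc" then c.modify "lxc" 0 (· + 1)
    else c
  if pvGetR r "status" = some "running" then c1.modify "running" 0 (· + 1) else c1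

-- abstraction from B's group entry to A's per-node entry
def pvF (p : String × List (List (String × String))) : String × PySem.Dict String Int :=
  (p.1, PySem.Dict.mk (pvCounts p.2))

lemma pv_nodup_insert {ν : Type} (d : PySem.Dict String ν) (k : String) (v : ν)
    (hnd : d.keys.Nodup) : (d.insert k v).keys.Nodup := by
  by_cases hc : d.contains k = true
  · rw [PySem.Dict.keys_insert_of_contains _ _ hc]; exact hnd
  · rw [PySem.Dict.keys_insert_of_not_contains _ _ (by simpa using hc)]
    refine List.Nodup.append hnd (List.nodup_singleton k) ?_
    intro a ha hb
    simp at hb; subst hb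
    rw [PySem.Dict.contains_eq_decide_mem_keys] at hc
    simp at hc; exact hc ha

lemma pv_insert_getD_self (d : PySem.Dict String (PySem.Dict String Int)) (k : String)
    (hnd : d.keys.Nodup) (hc : d.contains k = true) :
    d.insert k (d.getD k pvZero) = d := by
  apply PySem.Dict.ext
  rw [PySem.Dict.items_insert_of_contains _ _ hc]
  have h : ∀ p ∈ d.items, (if (p.1 == k) = true then (k, d.getD k pvZero) else p) = p := by
    intro p hp
    by_cases he : p.1 = k
    · subst he
      have : d.getD p.1 pvZero = p.2 := PySem.Dict.getD_of_mem_items d hp hnd pvZero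
      simp [this]
    · simp [he]
  rw [List.map_congr_left h]; simp

lemma pv_setdefault_nodup (d : PySem.Dict String (PySem.Dict String Int)) (k : String)
    (hnd : d.keys.Nodup) : (d.setdefault k pvZero).keys.Nodup := by
  by_cases hc : d.contains k = true
  · rw [PySem.Dict.setdefault_of_contains _ _ hc]; exact hnd
  · rw [PySem.Dict.setdefault_of_not_contains _ _ (by simpa using hc)]
    exact pv_nodup_insert d k pvZero hnd

lemma pv_stepA_eq (d : PySem.Dict String (PySem.Dict String Int)) (r : List (String × String))
    (node : String) (hn : pvGetR r "node" = some node) (hne : node ≠ "")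
    (hnd : d.keys.Nodup) :
    pvStepA d r =
      (d.setdefault node pvZero).insert node
        (pvInnerInc r ((d.setdefault node pvZero).getD node pvZero)) := by
  have hnd0 := pv_setdefault_nodup d node hnd
  have hc0 : (d.setdefault node pvZero).contains node = true := by
    rw [PySem.Dict.contains_setdefault]; simp
  unfold pvStepA pvInnerInc
  rw [hn]
  simp only [if_neg hne]
  by_cases hq : pvGetR r "type" = some "qemu" <;>
  by_cases hl : pvGetR r "type" = some "lxc" <;>
  by_cases hs : pvGetR r "status" = some "running" <;>
  simp [hq, hl, hs, PySem.Dict.modify,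
    PySem.Dict.getD_insert_self, PySem.Dict.insert_insert_self]
  exact (pv_insert_getD_self _ _ hnd0 hc0).symm

lemma pv_innerInc_counts (r : List (String × String)) (rs : List (List (String × String))) :
    pvInnerInc r (PySem.Dict.mk (pvCounts rs)) = PySem.Dict.mk (pvCounts (rs ++ [r])) := by
  unfold pvInnerInc pvCounts
  by_cases hq : pvGetR r "type" = some "qemu" <;>
  by_cases hl : pvGetR r "type" = some "lxc" <;>
  by_cases hs : pvGetR r "status" = some "running" <;>
  simp [hq, hl, hs, List.countP_append, List.countP_nil,
    PySem.Dict.modify, PySem.Dict.insert, PySem.Dict.getD, PySem.Dict.get?,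
    PySem.Dict.contains]

lemma pv_keys_mkF (g : PySem.Dict String (List (List (String × String)))) :
    (PySem.Dict.mk (g.items.map pvF)).keys = g.keys := by
  simp [PySem.Dict.keys, List.map_map, pvF, Function.comp]

lemma pv_step_comm (g : PySem.Dict String (List (List (String × String))))
    (r : List (String × String)) (hnd : g.keys.Nodup) :
    pvStepA (PySem.Dict.mk (g.items.map pvF)) r = PySem.Dict.mk ((pvStepB g r).items.map pvF) := by
  set d := PySem.Dict.mk (g.items.map pvF) with hd
  have hdk : d.keys = g.keys := pv_keys_mkF g
  have hdnd : d.keys.Nodup := hdk ▸ hnd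
  have hcc : ∀ k, d.contains k = g.contains k := by
    intro k
    rw [PySem.Dict.contains_eq_decide_mem_keys, PySem.Dict.contains_eq_decide_mem_keys, hdk]
  unfold pvStepB
  cases hn : pvGetR r "node" with
  | none => simp [pvStepA, hn]; exact hd
  | some node =>
    by_cases he : node = ""
    · simp [pvStepA, hn, he]; exact hd
    · rw [pv_stepA_eq d r node hn he hdnd]
      simp only [if_neg he]
      by_cases hc : g.contains node = true
      · obtain ⟨rs0, hrs0⟩ : ∃ rs0, g.get? node = some rs0 := by
          rw [PySem.Dict.contains_eq_isSome_get?] at hc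
          exact Option.isSome_iff_exists.mp hc
        have hmem : (node, rs0) ∈ g.items := PySem.Dict.mem_items_of_get?_eq_some g hrs0
        have hgetDg : g.getD node [] = rs0 := PySem.Dict.getD_of_mem_items g hmem hnd []
        have hdc : d.contains node = true := (hcc node).trans hc
        rw [PySem.Dict.setdefault_of_contains _ _ hdc]
        have hmemd : (node, PySem.Dict.mk (pvCounts rs0)) ∈ d.items :=
          List.mem_map.mpr ⟨(node, rs0), hmem, rfl⟩
        have hgetDd : d.getD node pvZero = PySem.Dict.mk (pvCounts rs0) :=
          PySem.Dict.getD_of_mem_items d hmemd hdnd pvZero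
        rw [hgetDd, pv_innerInc_counts, PySem.Dict.modify, hgetDg]
        apply PySem.Dict.ext
        rw [PySem.Dict.items_insert_of_contains _ _ hdc,
            PySem.Dict.items_insert_of_contains _ _ hc]
        show (g.items.map pvF).map _ = _
        simp only [List.map_map]
        apply List.map_congr_left
        intro p _
        by_cases hp : p.1 = node
        · simp [pvF, Function.comp, hp]
        · simp [pvF, Function.comp, hp]
      · have hgc : g.contains node = false := by simpa using hc
        have hdc : d.contains node = false := (hcc node).trans hgc
        have hz : PySem.Dict.mk (pvCounts []) = pvZero := rfl
        rw [PySem.Dict.setdefault_of_not_contains _ _ hdc, PySem.Dict.getD_insert_self,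
            PySem.Dict.insert_insert_self, ← hz, pv_innerInc_counts,
            PySem.Dict.modify, PySem.Dict.getD_of_not_contains _ _ hgc]
        apply PySem.Dict.ext
        rw [PySem.Dict.items_insert_of_not_contains _ _ hdc,
            PySem.Dict.items_insert_of_not_contains _ _ hgc]
        simp [pvF, hd]

lemma pv_stepB_nodup (g : PySem.Dict String (List (List (String × String))))
    (r : List (String × String)) (hnd : g.keys.Nodup) : (pvStepB g r).keys.Nodup := by
  cases hn : pvGetR r "node" with
  | none => simpa [pvStepB, hn] using hnd
  | some node =>
    by_cases he : node = ""
    · simpa [pvStepB, hn, he] using hnd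
    · have hB : pvStepB g r = g.insert node (g.getD node [] ++ [r]) := by
        simp [pvStepB, hn, he, PySem.Dict.modify]
      rw [hB]
      exact pv_nodup_insert g node _ hnd

lemma pv_main (rs : List (List (String × String)))
    (g : PySem.Dict String (List (List (String × String)))) (hnd : g.keys.Nodup) :
    rs.foldl pvStepA (PySem.Dict.mk (g.items.map pvF)) =
      PySem.Dict.mk ((rs.foldl pvStepB g).items.map pvF) := by
  induction rs generalizing g with
  | nil => rfl
  | cons r rs ih =>
    simp only [List.foldl_cons]
    rw [pv_step_comm g r hnd, ih _ (pv_stepB_nodup g r hnd)]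

-- ===== VERDICT (by name: the statement is the Claim_ definition above) =====
theorem summarize_vms_spec : Claim_equal_summarize_vms := by
  intro resources _
  unfold Spec_summarize_vms summarize_vms summarize_vms_alt
  have h := pv_main resources PySem.Dict.empty (by simp [PySem.Dict.keys, PySem.Dict.empty])
  have he : PySem.Dict.mk ((PySem.Dict.empty : PySem.Dict String (List (List (String × String)))).items.map pvF) = PySem.Dict.empty := rfl
  rw [he] at h
  rw [h]
  simp [List.map_map, pvF, Function.comp]
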